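-- pv_equiv track=rewrite | github.com/a-r-a-d-e-s-h/aoc-2019 | day17/main.py | split_by_sublist
-- ===== SOURCE A (Python) =====
-- def split_by_sublist(x, s):
--     len_x = len(x)
--     len_s = len(s)
--     done_up_to = 0
--     offset = 0
--     ret = []
--     while offset <= len_x - 1:
--         if x[offset:offset + len_s] == s:
--             if offset > done_up_to:
--                 ret.append(x[done_up_to:offset])
--             offset = offset + len_s
--             done_up_to = offset
--             continue
--         offset += 1
--     else:
--         if done_up_to < len_x:
--             ret.append(x[done_up_to:])
--     return ret
-- ===== SOURCE B (Python) =====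
-- def split_by_sublist(x, s):
--     m = len(s)
--     n = len(x)
--     parts = []
--     cur = []
--     i = 0
--     while i < n:
--         if x[i:i + m] == s:
--             if cur:
--                 parts.append(cur)
--                 cur = []
--             i += m
--         else:
--             cur.append(x[i])
--             i += 1
--     if cur:
--         parts.append(cur)
--     return parts
-- ===== Notes on version B (the rewrite author's own statement) =====
-- stated objective: alternative
-- what changed: B builds each part element by element in a running chunk accumulator flushed at separator matches, instead of A's done_up_to/offset index pair with slice extraction and a while-else epilogue.
import Mathlib
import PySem

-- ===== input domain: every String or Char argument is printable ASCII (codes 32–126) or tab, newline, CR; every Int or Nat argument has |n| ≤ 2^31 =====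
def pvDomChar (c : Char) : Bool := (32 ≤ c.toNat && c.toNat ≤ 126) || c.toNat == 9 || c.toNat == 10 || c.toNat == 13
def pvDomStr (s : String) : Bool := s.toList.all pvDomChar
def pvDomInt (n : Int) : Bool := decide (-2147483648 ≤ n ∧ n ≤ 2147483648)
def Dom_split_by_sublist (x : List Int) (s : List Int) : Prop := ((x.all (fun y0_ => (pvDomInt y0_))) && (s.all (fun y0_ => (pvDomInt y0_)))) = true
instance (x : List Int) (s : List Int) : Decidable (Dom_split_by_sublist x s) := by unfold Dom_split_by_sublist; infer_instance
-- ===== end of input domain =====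

-- B replaces A's done_up_to/offset index pair with a running chunk accumulator flushed at matches (objective: alternative decomposition, same cost).

-- ===== PORT A =====
-- A's while loop, transliterated with a fuel parameter: whenever the Python loop terminates
-- each iteration advances offset by at least 1, so x.length + 1 fuel is never exhausted
-- (with s = [] and x ≠ [] both Pythons loop forever; the ports then return the parts so far).
def pvAloop (x s : List Int) (lenx lens : Int) :
    Nat → Int → Int → List (List Int) → List (List Int)
  | 0, _, _, ret => ret
  | fuel + 1, offset, done, ret =>
    if offset ≤ lenx - 1 then
      if PySem.List.slice x (some offset) (some (offset + lens)) = s then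
        pvAloop x s lenx lens fuel (offset + lens) (offset + lens)
          (if done < offset then ret ++ [PySem.List.slice x (some done) (some offset)] else ret)
      else
        pvAloop x s lenx lens fuel (offset + 1) done ret
    else -- while-else clause
      if done < lenx then ret ++ [PySem.List.slice x (some done) none] else ret

def split_by_sublist (x : List Int) (s : List Int) : List (List Int) :=
  pvAloop x s (x.length : Int) (s.length : Int) (x.length + 1) 0 0 []

-- ===== PORT B =====
-- cur.append(x[i]): i is always in range here, so pyGet? is some; .toList appends that element.
def pvBloop (x s : List Int) (m n : Int) :
    Nat → Int → List Int → List (List Int) → List (List Int)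
  | 0, _, _, parts => parts
  | fuel + 1, i, cur, parts =>
    if i < n then
      if PySem.List.slice x (some i) (some (i + m)) = s then
        pvBloop x s m n fuel (i + m) [] (if cur ≠ [] then parts ++ [cur] else parts)
      else
        pvBloop x s m n fuel (i + 1) (cur ++ (PySem.List.pyGet? x i).toList) parts
    else
      if cur ≠ [] then parts ++ [cur] else parts

def split_by_sublist_alt (x : List Int) (s : List Int) : List (List Int) :=
  pvBloop x s (s.length : Int) (x.length : Int) (x.length + 1) 0 [] []

-- ===== PRECONDITION & SPEC =====
def Spec_split_by_sublist (x : List Int) (s : List Int) (out : List (List Int)) : Prop := out = split_by_sublist_alt x s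
instance (x : List Int) (s : List Int) (out : List (List Int)) : Decidable (Spec_split_by_sublist x s out) := by unfold Spec_split_by_sublist; infer_instance

-- ===== CLAIM (what is proved, stated in full; the proofs are below) =====
def Claim_equal_split_by_sublist : Prop := ∀ (x : List Int) (s : List Int), Dom_split_by_sublist x s → Spec_split_by_sublist x s (split_by_sublist x s)

-- ===== LEMMAS AND PROOFS =====

lemma slice_self_nil (x : List Int) (a : Int) (ha : 0 ≤ a) :
    PySem.List.slice x (some a) (some a) = ([] : List Int) := by
  rw [PySem.List.slice_toNat x ha ha]; simp

lemma slice_nil_iff (x : List Int) (d o : Int) (hd : 0 ≤ d) (hdo : d ≤ o)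
    (ho : o ≤ (x.length : Int)) :
    PySem.List.slice x (some d) (some o) = [] ↔ o ≤ d := by
  rw [PySem.List.slice_toNat x hd (le_trans hd hdo)]
  simp only [List.take_eq_nil_iff, List.drop_eq_nil_iff]
  omega

lemma slice_snoc (x : List Int) (d o : Int) (hd : 0 ≤ d) (hdo : d ≤ o)
    (ho : o < (x.length : Int)) :
    PySem.List.slice x (some d) (some (o + 1))
      = PySem.List.slice x (some d) (some o) ++ (PySem.List.pyGet? x o).toList := by
  have h0o : 0 ≤ o := le_trans hd hdo
  rw [PySem.List.slice_toNat x hd (by omega), PySem.List.slice_toNat x hd h0o]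
  have hget : PySem.List.pyGet? x o = x[o.toNat]? := by
    simp [PySem.List.pyGet?, PySem.List.pyIdx?, h0o, ho]
  have h1 : (o + 1).toNat - d.toNat = (o.toNat - d.toNat) + 1 := by omega
  have h2 : d.toNat + (o.toNat - d.toNat) = o.toNat := by omega
  rw [hget, h1, List.take_add_one, List.getElem?_drop, h2]

lemma slice_match_bound (x s : List Int) (o : Int) (h0 : 0 ≤ o) (ho : o < (x.length : Int))
    (hm : PySem.List.slice x (some o) (some (o + (s.length : Int))) = s) :
    o + (s.length : Int) ≤ (x.length : Int) ∨ s = [] := by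
  rcases eq_or_ne s ([] : List Int) with hs | hs
  · exact Or.inr hs
  · left
    have := congrArg List.length hm
    rw [PySem.List.slice_toNat x h0 (by positivity)] at this
    simp [List.length_take, List.length_drop] at this
    omega

lemma lockstep (x s : List Int) :
    ∀ (fuel : Nat) (offset done : Int) (ret : List (List Int)),
      0 ≤ done → done ≤ offset → done ≤ (x.length : Int) →
      (offset ≤ (x.length : Int) ∨ offset = done) →
      pvAloop x s (x.length : Int) (s.length : Int) fuel offset done ret
        = pvBloop x s (s.length : Int) (x.length : Int) fuel offset
            (PySem.List.slice x (some done) (some offset)) ret := by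
  intro fuel
  induction fuel with
  | zero => intro offset done ret _ _ _ _; simp [pvAloop, pvBloop]
  | succ fuel ih =>
    intro offset done ret h0d hdo hdL hinv
    by_cases h : offset < (x.length : Int)
    · have hA : offset ≤ (x.length : Int) - 1 := by omega
      by_cases hm : PySem.List.slice x (some offset) (some (offset + (s.length : Int))) = s
      · -- separator matches at offset: both flush the pending chunk and jump
        have hchunk :
            (if done < offset then ret ++ [PySem.List.slice x (some done) (some offset)] else ret)
              = (if PySem.List.slice x (some done) (some offset) ≠ [] then
                   ret ++ [PySem.List.slice x (some done) (some offset)] else ret) := by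
          have hiff := slice_nil_iff x done offset h0d hdo (by omega)
          by_cases hlt : done < offset
          · rw [if_pos hlt, if_pos (by simp only [ne_eq, hiff]; omega)]
          · rw [if_neg hlt, if_neg (by simp only [ne_eq, hiff, not_le, not_lt]; omega)]
        have hbound := slice_match_bound x s offset (by omega) h hm
        have hdL' : offset + (s.length : Int) ≤ (x.length : Int) ∨ offset + (s.length : Int) = offset := by
          rcases hbound with hb | hb
          · exact Or.inl hb
          · right; simp [hb]
        simp only [pvAloop, pvBloop, if_pos hA, if_pos h, if_pos hm]
        rw [hchunk, ih (offset + (s.length : Int)) (offset + (s.length : Int)) _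
              (by omega) (le_refl _)
              (by rcases hdL' with hb | hb <;> omega) (by rcases hdL' with hb | hb <;> omega),
            slice_self_nil x _ (by omega)]
      · -- no match: A advances offset, B appends x[offset] to the chunk
        simp only [pvAloop, pvBloop, if_pos hA, if_pos h, if_neg hm]
        rw [ih (offset + 1) done _ h0d (by omega) hdL (by omega),
            slice_snoc x done offset h0d hdo h]
    · -- loop exit: A's while-else epilogue vs B's final flush
      have hA : ¬ offset ≤ (x.length : Int) - 1 := by omega
      simp only [pvAloop, pvBloop, if_neg hA, if_neg h]
      rcases hinv with hle | heq
      · have hoff : offset = (x.length : Int) := by omega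
        subst hoff
        have hslice : PySem.List.slice x (some done) (some (x.length : Int))
            = PySem.List.slice x (some done) none := by
          rw [PySem.List.slice_toNat x h0d (by positivity), PySem.List.slice_from x h0d]
          exact List.take_of_length_le (by simp)
        have hiff := slice_nil_iff x done (x.length : Int) h0d hdL (le_refl _)
        rw [hslice] at hiff ⊢
        by_cases hlt : done < (x.length : Int)
        · rw [if_pos hlt, if_pos (by simp only [ne_eq, hiff]; omega)]
        · rw [if_neg hlt, if_neg (by simp only [ne_eq, hiff, not_le, not_lt]; omega)]
      · subst heq
        rw [slice_self_nil x offset h0d,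
            if_neg (by omega), if_neg (by simp)]

-- ===== VERDICT (by name: the statement is the Claim_ definition above) =====
theorem split_by_sublist_spec : Claim_equal_split_by_sublist := by
  intro x s _
  unfold Spec_split_by_sublist split_by_sublist split_by_sublist_alt
  rw [lockstep x s (x.length + 1) 0 0 [] (le_refl 0) (le_refl 0) (by positivity)
        (Or.inl (by positivity)),
      slice_self_nil x 0 (le_refl 0)]
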